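-- pv_equiv track=rewrite | github.com/eedarozal-oss/chicken-breeder-tool | chicken-breeder-tool-deploy/app.py | recommend_ultimate_item
-- ===== SOURCE A (Python) =====
-- def safe_int(value, default=None):
--     try:
--         return int(value)
--     except (TypeError, ValueError):
--         return default
--
-- STAT_ITEM_RULES = {
--     "innate_attack": ("Cocktail's Beak", "Best when this parent is contributing strong Attack inheritance."),
--     "innate_defense": ("Pos2 Pellet", "Best when this parent is contributing strong Defense inheritance."),
--     "innate_speed": ("Fetzzz Feet", "Best when this parent is contributing strong Speed inheritance."),
--     "innate_health": ("Vananderen's Vitality", "Best when this parent is contributing strong Health inheritance."),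
-- }
--
-- def get_top_base_stat_field(chicken):
--     stat_fields = ["innate_attack", "innate_defense", "innate_speed", "innate_health"]
--     ranked = []
--     for field in stat_fields:
--         ranked.append((field, safe_int(chicken.get(field), 0) or 0))
--     ranked.sort(key=lambda x: (-x[1], x[0]))
--     return ranked
--
-- def recommend_ultimate_item(parent, other_parent=None):
--     primary_count = safe_int(parent.get("primary_build_match_count"), 0) or 0
--     if primary_count >= 4:
--         return {
--             "name": "Gregor's Gift",
--             "reason": "Best when this parent is contributing a strong primary build.",
--         }
--
--     ranked = get_top_base_stat_field(parent)
--     broad_count = sum(1 for _, value in ranked if value >= 32)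
--     if broad_count >= 3:
--         return {
--             "name": "Soulknot",
--             "reason": "Best when this parent is strong across several innate stats.",
--         }
--
--     top_field = ranked[0][0]
--     item_name, reason = STAT_ITEM_RULES[top_field]
--     return {
--         "name": item_name,
--         "reason": reason,
--     }
-- ===== SOURCE B (Python) =====
-- def _val(parent, key):
--     try:
--         return int(parent.get(key))
--     except (TypeError, ValueError):
--         return 0
--
-- def _pick(name, reason):
--     return {"name": name, "reason": reason}
--
-- def recommend_ultimate_item(parent, other_parent=None):
--     if _val(parent, "primary_build_match_count") >= 4:
--         return _pick("Gregor's Gift",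
--                      "Best when this parent is contributing a strong primary build.")
--     a = _val(parent, "innate_attack")
--     d = _val(parent, "innate_defense")
--     s = _val(parent, "innate_speed")
--     h = _val(parent, "innate_health")
--     # "broad" = at most one stat falls below the 32 threshold
--     if (a < 32) + (d < 32) + (s < 32) + (h < 32) <= 1:
--         return _pick("Soulknot",
--                      "Best when this parent is strong across several innate stats.")
--     # decision chain: ties go to the alphabetically-smallest field
--     # (attack < defense < health < speed)
--     if a >= d and a >= s and a >= h:
--         return _pick("Cocktail's Beak",
--                      "Best when this parent is contributing strong Attack inheritance.")
--     if d >= s and d >= h: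
--         return _pick("Pos2 Pellet",
--                      "Best when this parent is contributing strong Defense inheritance.")
--     if h >= s:
--         return _pick("Vananderen's Vitality",
--                      "Best when this parent is contributing strong Health inheritance.")
--     return _pick("Fetzzz Feet",
--                  "Best when this parent is contributing strong Speed inheritance.")
-- ===== Notes on version B (the rewrite author's own statement) =====
-- stated objective: simpler
-- what changed: B removes A's ranked-list construction, sort and rule-table lookup entirely: it reads the four stats once and decides the item by a direct comparison chain (ties to the alphabetically-smallest field) and tests broadness as 'at most one stat below 32', returning each literal answer inline.
import Mathlib
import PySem

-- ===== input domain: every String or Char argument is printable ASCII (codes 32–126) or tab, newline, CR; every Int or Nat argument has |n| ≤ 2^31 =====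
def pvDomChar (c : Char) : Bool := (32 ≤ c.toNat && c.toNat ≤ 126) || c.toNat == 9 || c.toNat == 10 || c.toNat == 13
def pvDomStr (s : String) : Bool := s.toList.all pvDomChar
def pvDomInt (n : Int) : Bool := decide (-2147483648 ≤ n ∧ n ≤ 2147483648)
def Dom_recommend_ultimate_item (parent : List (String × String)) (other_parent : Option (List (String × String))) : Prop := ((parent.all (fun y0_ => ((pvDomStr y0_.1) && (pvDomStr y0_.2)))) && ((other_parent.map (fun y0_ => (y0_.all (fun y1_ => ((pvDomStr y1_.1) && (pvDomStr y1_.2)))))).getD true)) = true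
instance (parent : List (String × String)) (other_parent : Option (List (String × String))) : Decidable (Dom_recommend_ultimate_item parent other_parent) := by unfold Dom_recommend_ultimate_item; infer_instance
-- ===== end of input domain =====

-- B replaces A's ranked-list-plus-sort-plus-table-lookup with a straight-line comparison chain (simpler; same cost).

-- ===== PORT A =====
-- safe_int(value, default): int(None) raises TypeError, unparsable string ValueError → default
def pvSafeInt (value : Option String) (default : Int) : Int :=
  match value with
  | none => default
  | some s => (PySem.Int.ofStr? s).getD default

-- Python `x or 0` on an int
def pvOr0 (x : Int) : Int := if x = 0 then 0 else x

def STAT_ITEM_RULES : List (String × (String × String)) :=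
  [("innate_attack", ("Cocktail's Beak", "Best when this parent is contributing strong Attack inheritance.")),
   ("innate_defense", ("Pos2 Pellet", "Best when this parent is contributing strong Defense inheritance.")),
   ("innate_speed", ("Fetzzz Feet", "Best when this parent is contributing strong Speed inheritance.")),
   ("innate_health", ("Vananderen's Vitality", "Best when this parent is contributing strong Health inheritance."))]

def get_top_base_stat_field (chicken : List (String × String)) : List (String × Int) :=
  let stat_fields := ["innate_attack", "innate_defense", "innate_speed", "innate_health"]
  let ranked := stat_fields.foldl
    (fun acc field => acc ++ [(field, pvOr0 (pvSafeInt (PySem.Dict.get? (PySem.Dict.mk chicken) field) 0))]) []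
  PySem.List.sorted2 ranked (fun x => -x.2) (fun x => x.1)

def recommend_ultimate_item (parent : List (String × String)) (other_parent : Option (List (String × String))) : List (String × String) :=
  let primary_count := pvOr0 (pvSafeInt (PySem.Dict.get? (PySem.Dict.mk parent) "primary_build_match_count") 0)
  if primary_count ≥ 4 then
    [("name", "Gregor's Gift"),
     ("reason", "Best when this parent is contributing a strong primary build.")]
  else
    let ranked := get_top_base_stat_field parent
    let broad_count := ranked.foldl (fun n p => n + (if p.2 ≥ 32 then (1:Int) else 0)) 0
    if broad_count ≥ 3 then
      [("name", "Soulknot"),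
       ("reason", "Best when this parent is strong across several innate stats.")]
    else
      match PySem.List.pyGet? ranked 0 with
      | none => []  -- unreachable: ranked always has 4 elements (IndexError otherwise)
      | some top =>
        match PySem.Dict.get? (PySem.Dict.mk STAT_ITEM_RULES) top.1 with
        | none => []  -- unreachable KeyError
        | some (item_name, reason) => [("name", item_name), ("reason", reason)]

-- ===== PORT B =====
-- _val(parent, key): int(parent.get(key)) with 0 on TypeError/ValueError
def pvVal (parent : List (String × String)) (key : String) : Int :=
  ((PySem.Dict.get? (PySem.Dict.mk parent) key).bind PySem.Int.ofStr?).getD 0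

-- _pick(name, reason)
def pvPick (name reason : String) : List (String × String) :=
  [("name", name), ("reason", reason)]

def recommend_ultimate_item_alt (parent : List (String × String)) (other_parent : Option (List (String × String))) : List (String × String) :=
  if pvVal parent "primary_build_match_count" ≥ 4 then
    pvPick "Gregor's Gift" "Best when this parent is contributing a strong primary build."
  else
    let a := pvVal parent "innate_attack"
    let d := pvVal parent "innate_defense"
    let s := pvVal parent "innate_speed"
    let h := pvVal parent "innate_health"
    -- "broad" = at most one stat falls below the 32 threshold
    if (if a < 32 then (1:Int) else 0) + (if d < 32 then 1 else 0)
        + (if s < 32 then 1 else 0) + (if h < 32 then 1 else 0) ≤ 1 then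
      pvPick "Soulknot" "Best when this parent is strong across several innate stats."
    -- decision chain: ties go to the alphabetically-smallest field (attack < defense < health < speed)
    else if a ≥ d ∧ a ≥ s ∧ a ≥ h then
      pvPick "Cocktail's Beak" "Best when this parent is contributing strong Attack inheritance."
    else if d ≥ s ∧ d ≥ h then
      pvPick "Pos2 Pellet" "Best when this parent is contributing strong Defense inheritance."
    else if h ≥ s then
      pvPick "Vananderen's Vitality" "Best when this parent is contributing strong Health inheritance."
    else
      pvPick "Fetzzz Feet" "Best when this parent is contributing strong Speed inheritance."

-- ===== PRECONDITION & SPEC =====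
def Spec_recommend_ultimate_item (parent : List (String × String)) (other_parent : Option (List (String × String))) (out : List (String × String)) : Prop := out = recommend_ultimate_item_alt parent other_parent
instance (parent : List (String × String)) (other_parent : Option (List (String × String))) (out : List (String × String)) : Decidable (Spec_recommend_ultimate_item parent other_parent out) := by unfold Spec_recommend_ultimate_item; infer_instance

-- ===== CLAIM (what is proved, stated in full; the proofs are below) =====
def Claim_equal_recommend_ultimate_item : Prop := ∀ (parent : List (String × String)) (other_parent : Option (List (String × String))), Dom_recommend_ultimate_item parent other_parent → Spec_recommend_ultimate_item parent other_parent (recommend_ultimate_item parent other_parent)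

-- ===== LEMMAS AND PROOFS =====

theorem pvOr0_safeInt_eq_val (parent : List (String × String)) (key : String) :
    pvOr0 (pvSafeInt (PySem.Dict.get? (PySem.Dict.mk parent) key) 0) = pvVal parent key := by
  unfold pvOr0 pvSafeInt pvVal
  cases PySem.Dict.get? (PySem.Dict.mk parent) key with
  | none => simp
  | some s => simp; intro h; omega

theorem foldl_count_A (l : List (String × Int)) (i : Int) :
    l.foldl (fun n p => n + (if p.2 ≥ 32 then (1:Int) else 0)) i
      = i + (l.countP (fun p => decide (p.2 ≥ 32)) : Int) := by
  induction l generalizing i with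
  | nil => simp
  | cons x t ih => simp [List.foldl_cons, List.countP_cons, ih]; split_ifs <;> omega

theorem countP_sorted2 (xs : List (String × Int)) (p : String × Int → Bool) :
    (PySem.List.sorted2 xs (fun x => -x.2) (fun x => x.1)).countP p = xs.countP p :=
  (PySem.List.sorted2_perm xs _ _ _).countP_eq p

-- head of A's sorted ranking, as B's comparison chain
set_option maxHeartbeats 1600000 in
set_option maxRecDepth 4000 in
theorem head_lemma (a d s h : Int) :
    PySem.List.pyGet? (PySem.List.sorted2
      [("innate_attack", a), ("innate_defense", d), ("innate_speed", s), ("innate_health", h)]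
      (fun x => -x.2) (fun x => x.1)) 0
    = some (if a ≥ d ∧ a ≥ s ∧ a ≥ h then ("innate_attack", a)
        else if d ≥ s ∧ d ≥ h then ("innate_defense", d)
        else if h ≥ s then ("innate_health", h)
        else ("innate_speed", s)) := by
  by_cases c1 : a < d
  · by_cases c2 : d < s
    · by_cases c3 : s ≤ h
      · simp [c1, c2, c3, PySem.List.sorted2, PySem.List.insertBy, List.foldl,
          List.cons_lt_cons_iff, PySem.List.pyGet?, PySem.List.pyIdx?, show s < h ∨ s = h by omega]
        <;> split_ifs <;> simp_all <;> omega
      · simp [c1, c2, c3, PySem.List.sorted2, PySem.List.insertBy, List.foldl,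
          List.cons_lt_cons_iff, PySem.List.pyGet?, PySem.List.pyIdx?, show ¬ s < h by omega,
          show s ≠ h by omega]
        <;> split_ifs <;> simp_all <;> omega
    · by_cases c3 : d < h
      · simp [c1, c2, c3, PySem.List.sorted2, PySem.List.insertBy, List.foldl,
          List.cons_lt_cons_iff, PySem.List.pyGet?, PySem.List.pyIdx?]
        <;> split_ifs <;> simp_all <;> omega
      · simp [c1, c2, c3, PySem.List.sorted2, PySem.List.insertBy, List.foldl,
          List.cons_lt_cons_iff, PySem.List.pyGet?, PySem.List.pyIdx?]
        <;> split_ifs <;> simp_all <;> omega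
  · by_cases c2 : a < s
    · by_cases c3 : s ≤ h
      · simp [c1, c2, c3, PySem.List.sorted2, PySem.List.insertBy, List.foldl,
          List.cons_lt_cons_iff, PySem.List.pyGet?, PySem.List.pyIdx?, show s < h ∨ s = h by omega]
        <;> split_ifs <;> simp_all <;> omega
      · simp [c1, c2, c3, PySem.List.sorted2, PySem.List.insertBy, List.foldl,
          List.cons_lt_cons_iff, PySem.List.pyGet?, PySem.List.pyIdx?, show ¬ s < h by omega,
          show s ≠ h by omega]
        <;> split_ifs <;> simp_all <;> omega
    · by_cases c3 : a < h
      · simp [c1, c2, c3, PySem.List.sorted2, PySem.List.insertBy, List.foldl,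
          List.cons_lt_cons_iff, PySem.List.pyGet?, PySem.List.pyIdx?]
        <;> split_ifs <;> simp_all <;> omega
      · simp [c1, c2, c3, PySem.List.sorted2, PySem.List.insertBy, List.foldl,
          List.cons_lt_cons_iff, PySem.List.pyGet?, PySem.List.pyIdx?]
        <;> split_ifs <;> simp_all <;> omega

-- closed rule-table lookups, proved once and used as rewrite rules
theorem rule_attack : PySem.Dict.get? (PySem.Dict.mk STAT_ITEM_RULES) "innate_attack"
    = some ("Cocktail's Beak", "Best when this parent is contributing strong Attack inheritance.") := by decide
theorem rule_defense : PySem.Dict.get? (PySem.Dict.mk STAT_ITEM_RULES) "innate_defense"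
    = some ("Pos2 Pellet", "Best when this parent is contributing strong Defense inheritance.") := by decide
theorem rule_speed : PySem.Dict.get? (PySem.Dict.mk STAT_ITEM_RULES) "innate_speed"
    = some ("Fetzzz Feet", "Best when this parent is contributing strong Speed inheritance.") := by decide
theorem rule_health : PySem.Dict.get? (PySem.Dict.mk STAT_ITEM_RULES) "innate_health"
    = some ("Vananderen's Vitality", "Best when this parent is contributing strong Health inheritance.") := by decide

-- A's broad-stat count ≥ 3 is B's "at most one stat below 32"
theorem broad_iff (a d s h : Int) :
    ((0:Int) + (List.countP (fun p => decide (p.2 ≥ 32))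
        [("innate_attack", a), ("innate_defense", d), ("innate_speed", s), ("innate_health", h)] : Int) ≥ 3)
    ↔ ((if a < 32 then (1:Int) else 0) + (if d < 32 then 1 else 0)
        + (if s < 32 then 1 else 0) + (if h < 32 then 1 else 0) ≤ 1) := by
  simp only [List.countP_cons, List.countP_nil]
  split_ifs <;> simp_all <;> omega

set_option maxHeartbeats 1600000 in
-- ===== VERDICT (by name: the statement is the Claim_ definition above) =====
theorem recommend_ultimate_item_spec : Claim_equal_recommend_ultimate_item := by
  intro parent other_parent _
  unfold Spec_recommend_ultimate_item recommend_ultimate_item recommend_ultimate_item_alt get_top_base_stat_field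
  simp only [foldl_count_A, countP_sorted2]
  simp only [List.foldl, List.nil_append, List.cons_append]
  simp only [pvOr0_safeInt_eq_val]
  generalize pvVal parent "primary_build_match_count" = pc
  generalize pvVal parent "innate_attack" = a
  generalize pvVal parent "innate_defense" = d
  generalize pvVal parent "innate_speed" = s
  generalize pvVal parent "innate_health" = h
  by_cases hpc : pc ≥ 4
  · simp [hpc, pvPick]
  · simp only [if_neg hpc]
    rw [head_lemma, if_congr (broad_iff a d s h) rfl rfl]
    by_cases hb : (if a < 32 then (1:Int) else 0) + (if d < 32 then 1 else 0)
        + (if s < 32 then 1 else 0) + (if h < 32 then 1 else 0) ≤ 1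
    · simp only [if_pos hb, pvPick]
    · simp only [if_neg hb]
      by_cases h1 : a ≥ d ∧ a ≥ s ∧ a ≥ h
      · simp only [if_pos h1, rule_attack, pvPick]
      · simp only [if_neg h1]
        by_cases h2 : d ≥ s ∧ d ≥ h
        · simp only [if_pos h2, rule_defense, pvPick]
        · simp only [if_neg h2]
          by_cases h3 : h ≥ s
          · simp only [if_pos h3, rule_health, pvPick]
          · simp only [if_neg h3, rule_speed, pvPick]
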